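-- pv_equiv track=rewrite | github.com/aielk/rake-custom | rake.py | create_candidate_keywords
-- ===== SOURCE A (Python) =====
-- def create_candidate_keywords (text_words, stop_words):
-- 	candidates = []
-- 	keyword = []
--
-- 	for word in text_words:
-- 		if word in stop_words:
-- 			keyword = " ".join (keyword)
-- 			if keyword and keyword not in candidates:
-- 				candidates.append (keyword)
-- 			keyword = []
-- 			continue
-- 		keyword.append (word)
--
-- 	keyword = " ".join (keyword)
-- 	if keyword and keyword not in candidates:
-- 		candidates.append (keyword)
--
-- 	return candidates
-- ===== SOURCE B (Python) =====
-- def create_candidate_keywords(text_words, stop_words):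
--     stops = set(stop_words)
--     # Phase 1: scan maximal runs of non-stop words (two-pointer), join each run.
--     phrases = []
--     i, n = 0, len(text_words)
--     while i < n:
--         if text_words[i] in stops:
--             i += 1
--             continue
--         j = i
--         while j < n and text_words[j] not in stops:
--             j += 1
--         phrase = " ".join(text_words[i:j])
--         if phrase:
--             phrases.append(phrase)
--         i = j
--     # Phase 2: order-preserving dedup with a seen set.
--     seen = set()
--     result = []
--     for p in phrases:
--         if p not in seen:
--             seen.add(p)
--             result.append(p)
--     return result
-- ===== Notes on version B (the rewrite author's own statement) =====
-- stated objective: faster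
-- what changed: B splits the word list into maximal non-stop runs with a two-pointer scan (joining each run at once) and then deduplicates in a separate second pass with a seen set, replacing A's interleaved word-by-word accumulator loop whose 'keyword not in candidates' test rescans the growing candidate list for every flushed phrase.
import Mathlib
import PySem

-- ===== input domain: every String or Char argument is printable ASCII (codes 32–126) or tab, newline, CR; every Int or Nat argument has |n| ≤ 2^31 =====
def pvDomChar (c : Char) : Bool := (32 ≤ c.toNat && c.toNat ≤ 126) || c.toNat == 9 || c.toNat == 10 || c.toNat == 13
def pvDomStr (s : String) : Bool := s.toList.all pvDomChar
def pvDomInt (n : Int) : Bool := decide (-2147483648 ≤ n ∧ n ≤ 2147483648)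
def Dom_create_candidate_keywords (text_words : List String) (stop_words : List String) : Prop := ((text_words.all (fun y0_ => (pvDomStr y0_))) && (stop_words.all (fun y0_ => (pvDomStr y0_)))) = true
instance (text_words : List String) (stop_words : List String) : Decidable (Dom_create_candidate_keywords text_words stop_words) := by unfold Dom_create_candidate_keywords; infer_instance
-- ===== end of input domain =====

-- B splits the words into maximal non-stop runs (joined per run) and deduplicates in a
-- separate second pass with a seen set, instead of A's single interleaved accumulator loop;
-- objective: faster (set-based dedup instead of a list rescan per phrase) and a different decomposition.


-- ===== PORT A =====
-- one loop step of A: flush the pending keyword on a stop word, else extend it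
def aStep (stop_words : List String) (st : List String × List String) (word : String) :
    List String × List String :=
  if word ∈ stop_words then
    let keyword := PySem.Str.join " " st.2
    (if keyword ≠ "" ∧ keyword ∉ st.1 then st.1 ++ [keyword] else st.1, [])
  else
    (st.1, st.2 ++ [word])

def create_candidate_keywords (text_words : List String) (stop_words : List String) : List String :=
  let st := text_words.foldl (aStep stop_words) ([], [])
  let keyword := PySem.Str.join " " st.2
  if keyword ≠ "" ∧ keyword ∉ st.1 then st.1 ++ [keyword] else st.1

-- ===== PORT B =====
-- Phase 1 of B: the inner while loop scanning a maximal non-stop run is takeWhile/dropWhile;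
-- each run is joined at once and kept if non-empty.
def bPhrases (stops : PySem.Set String) : List String → List String
  | [] => []
  | w :: ws =>
    if w ∈ stops then bPhrases stops ws
    else
      let phrase := PySem.Str.join " " (w :: ws.takeWhile (fun x => decide (x ∉ stops)))
      let rest := bPhrases stops (ws.dropWhile (fun x => decide (x ∉ stops)))
      if phrase ≠ "" then phrase :: rest else rest
  termination_by ws => ws.length
  decreasing_by
    · simp only [List.length_cons]; omega
    · have := List.length_dropWhile_le (fun x => decide (x ∉ stops)) ws
      simp only [List.length_cons]; omega

-- Phase 2 of B: order-preserving dedup with a seen set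
def bDedupStep (st : PySem.Set String × List String) (p : String) :
    PySem.Set String × List String :=
  if p ∈ st.1 then st else (PySem.Set.add st.1 p, st.2 ++ [p])

def create_candidate_keywords_alt (text_words : List String) (stop_words : List String) : List String :=
  let stops : PySem.Set String := PySem.Set.ofList stop_words
  ((bPhrases stops text_words).foldl bDedupStep (PySem.Set.empty, [])).2

-- ===== PRECONDITION & SPEC =====
def Spec_create_candidate_keywords (text_words : List String) (stop_words : List String) (out : List String) : Prop := out = create_candidate_keywords_alt text_words stop_words
instance (text_words : List String) (stop_words : List String) (out : List String) : Decidable (Spec_create_candidate_keywords text_words stop_words out) := by unfold Spec_create_candidate_keywords; infer_instance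

-- ===== CLAIM (what is proved, stated in full; the proofs are below) =====
def Claim_equal_create_candidate_keywords : Prop := ∀ (text_words : List String) (stop_words : List String), Dom_create_candidate_keywords text_words stop_words → Spec_create_candidate_keywords text_words stop_words (create_candidate_keywords text_words stop_words)

-- ===== LEMMAS AND PROOFS =====

-- A's flush of a pending keyword into the candidate list
def finP (c kw : List String) : List String :=
  let k := PySem.Str.join " " kw
  if k ≠ "" ∧ k ∉ c then c ++ [k] else c

-- A's loop with the final flush, in structural-recursion form
def runA (sw : List String) (c kw : List String) : List String → List String
  | [] => finP c kw
  | w :: ws => if w ∈ sw then runA sw (finP c kw) [] ws else runA sw c (kw ++ [w]) ws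

-- splitting into groups, one word at a time, with pending accumulator kw
def splitAcc (stops : List String) (kw : List String) : List String → List (List String)
  | [] => [kw]
  | w :: ws => if w ∈ stops then kw :: splitAcc stops [] ws else splitAcc stops (kw ++ [w]) ws

def phrasesOf (stops : List String) (kw ws : List String) : List String :=
  ((splitAcc stops kw ws).map (PySem.Str.join " ")).filter (· ≠ "")

theorem phrasesOf_cons_stop (stops : List String) (kw ws : List String) {w : String}
    (h : w ∈ stops) :
    phrasesOf stops kw (w :: ws) =
      (if PySem.Str.join " " kw ≠ "" then [PySem.Str.join " " kw] else []) ++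
        phrasesOf stops [] ws := by
  by_cases hk : PySem.Str.join " " kw = "" <;>
    simp [phrasesOf, splitAcc, h, hk]

theorem phrasesOf_cons_nonstop (stops : List String) (kw ws : List String) {w : String}
    (h : w ∉ stops) :
    phrasesOf stops kw (w :: ws) = phrasesOf stops (kw ++ [w]) ws := by
  simp [phrasesOf, splitAcc, h]

-- dedup into c using membership in c itself
def dedupL (c : List String) : List String → List String
  | [] => c
  | p :: ps => if p ∈ c then dedupL c ps else dedupL (c ++ [p]) ps

theorem foldA_eq_runA (sw : List String) (ws c kw : List String) :
    (let st := ws.foldl (aStep sw) (c, kw)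
     let k := PySem.Str.join " " st.2
     if k ≠ "" ∧ k ∉ st.1 then st.1 ++ [k] else st.1) = runA sw c kw ws := by
  induction ws generalizing c kw with
  | nil => simp [runA, finP]
  | cons w ws ih =>
    by_cases h : w ∈ sw <;> simp [runA, h, List.foldl_cons, aStep, ← ih, finP]

theorem dedup_seen (ps : List String) (seen : PySem.Set String) (c : List String)
    (hinv : ∀ x, x ∈ seen ↔ x ∈ c) :
    (ps.foldl bDedupStep (seen, c)).2 = dedupL c ps := by
  induction ps generalizing seen c with
  | nil => simp [dedupL]
  | cons p ps ih =>
    by_cases h : p ∈ c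
    · simp only [List.foldl_cons, bDedupStep]
      rw [if_pos ((hinv p).mpr h)]
      simp [dedupL, h, ih seen c hinv]
    · simp only [List.foldl_cons, bDedupStep]
      rw [if_neg (fun hc => h ((hinv p).mp hc))]
      simp only [dedupL, if_neg h]
      exact ih _ _ (fun x => by
        rw [PySem.Set.mem_add]
        simp [hinv x, or_comm])

-- one step of phrase-chunking on the B side
theorem bPhrases_step (stops : PySem.Set String) (ws : List String) :
    (if PySem.Str.join " " (ws.takeWhile (fun x => decide (x ∉ stops))) ≠ "" then
        [PySem.Str.join " " (ws.takeWhile (fun x => decide (x ∉ stops)))] else []) ++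
      bPhrases stops (ws.dropWhile (fun x => decide (x ∉ stops)))
    = bPhrases stops ws := by
  cases ws with
  | nil => simp [bPhrases, PySem.Str.join]
  | cons w ws =>
    by_cases h : w ∈ stops
    · simp [bPhrases, h, List.takeWhile, List.dropWhile, PySem.Str.join]
    · rw [List.takeWhile_cons_of_pos (by simp [h]), List.dropWhile_cons_of_pos (by simp [h])]
      simp only [bPhrases, h, if_false]
      split <;> simp_all

theorem phrasesOf_eq_bPhrases (sw : List String) (ws kw : List String) :
    phrasesOf (PySem.Set.ofList sw) kw ws =
      (if PySem.Str.join " " (kw ++ ws.takeWhile (fun x => decide (x ∉ PySem.Set.ofList sw))) ≠ ""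
         then [PySem.Str.join " " (kw ++ ws.takeWhile (fun x => decide (x ∉ PySem.Set.ofList sw)))]
         else []) ++
      bPhrases (PySem.Set.ofList sw)
        (ws.dropWhile (fun x => decide (x ∉ PySem.Set.ofList sw))) := by
  induction ws generalizing kw with
  | nil =>
    by_cases hk : PySem.Str.join " " kw = "" <;>
      simp [phrasesOf, splitAcc, bPhrases, hk]
  | cons w ws ih =>
    by_cases h : w ∈ PySem.Set.ofList sw
    · rw [List.takeWhile_cons_of_neg (by simp [h]), List.dropWhile_cons_of_neg (by simp [h])]
      rw [phrasesOf_cons_stop _ _ _ h]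
      have hrec : phrasesOf (PySem.Set.ofList sw) [] ws = bPhrases (PySem.Set.ofList sw) ws := by
        rw [ih []]
        simpa using bPhrases_step (PySem.Set.ofList sw) ws
      rw [hrec]
      have hb : bPhrases (PySem.Set.ofList sw) (w :: ws) = bPhrases (PySem.Set.ofList sw) ws := by
        simp [bPhrases, h]
      rw [hb]
      simp
    · rw [List.takeWhile_cons_of_pos (by simp [h]), List.dropWhile_cons_of_pos (by simp [h])]
      rw [phrasesOf_cons_nonstop _ _ _ h, ih (kw ++ [w])]
      simp

theorem runA_eq_dedup (sw : List String) (ws kw c : List String) :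
    runA sw c kw ws = dedupL c (phrasesOf (PySem.Set.ofList sw) kw ws) := by
  induction ws generalizing kw c with
  | nil =>
    by_cases hk : PySem.Str.join " " kw = ""
    · simp [runA, finP, phrasesOf, splitAcc, hk, dedupL]
    · by_cases hc : PySem.Str.join " " kw ∈ c <;>
        simp [runA, finP, phrasesOf, splitAcc, hk, hc, dedupL]
  | cons w ws ih =>
    by_cases h : w ∈ sw
    · have h' : w ∈ PySem.Set.ofList sw := (PySem.Set.mem_ofList sw w).mpr h
      rw [show runA sw c kw (w :: ws) = runA sw (finP c kw) [] ws from by simp [runA, h]]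
      rw [ih [] (finP c kw), phrasesOf_cons_stop _ _ _ h']
      by_cases hk : PySem.Str.join " " kw = ""
      · simp [finP, hk]
      · by_cases hc : PySem.Str.join " " kw ∈ c <;> simp [finP, hk, hc, dedupL]
    · have h' : w ∉ PySem.Set.ofList sw := fun hc => h ((PySem.Set.mem_ofList sw w).mp hc)
      rw [show runA sw c kw (w :: ws) = runA sw c (kw ++ [w]) ws from by simp [runA, h]]
      rw [phrasesOf_cons_nonstop _ _ _ h']
      exact ih (kw ++ [w]) c

theorem A_runA (tw sw : List String) : create_candidate_keywords tw sw = runA sw [] [] tw := by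
  unfold create_candidate_keywords
  exact foldA_eq_runA sw tw [] []

theorem alt_dedup (tw sw : List String) :
    create_candidate_keywords_alt tw sw = dedupL [] (bPhrases (PySem.Set.ofList sw) tw) := by
  unfold create_candidate_keywords_alt
  exact dedup_seen _ _ _ (by simp [PySem.Set.empty])

-- ===== VERDICT (by name: the statement is the Claim_ definition above) =====
theorem create_candidate_keywords_spec : Claim_equal_create_candidate_keywords := by
  intro tw sw _
  show create_candidate_keywords tw sw = create_candidate_keywords_alt tw sw
  rw [A_runA, alt_dedup, runA_eq_dedup]
  congr 1
  rw [phrasesOf_eq_bPhrases sw tw []]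
  simpa using bPhrases_step (PySem.Set.ofList sw) tw
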